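-- pv_equiv track=rewrite | github.com/Eric-H-Thomas/SkillEstimationFramework2 | Environments/Darts/RandomDarts/darts.py | get_rewards_for_plot
-- ===== SOURCE A (Python) =====
-- def get_rewards_for_plot(state_boundaries):
--     """Return the reward level for each alternating region in the state."""
--
--     rewards = []
--     is_low_region = True
--
--     for boundary in state_boundaries:
--         if is_low_region:
--             rewards.append(1)
--             is_low_region = False
--         else:
--             rewards.append(0)
--             is_low_region = True
--
--     return rewards
-- ===== SOURCE B (Python) =====
-- def get_rewards_for_plot(state_boundaries):
--     """Return the reward level for each alternating region in the state."""
--     n = sum(1 for _ in state_boundaries)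
--     return ([1, 0] * ((n + 1) // 2))[:n]
-- ===== Notes on version B (the rewrite author's own statement) =====
-- stated objective: simpler
-- what changed: Replaces the per-element toggle flag and conditional append with a single length count followed by closed-form repetition of the two-element pattern and a slice to length n.
import Mathlib
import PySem

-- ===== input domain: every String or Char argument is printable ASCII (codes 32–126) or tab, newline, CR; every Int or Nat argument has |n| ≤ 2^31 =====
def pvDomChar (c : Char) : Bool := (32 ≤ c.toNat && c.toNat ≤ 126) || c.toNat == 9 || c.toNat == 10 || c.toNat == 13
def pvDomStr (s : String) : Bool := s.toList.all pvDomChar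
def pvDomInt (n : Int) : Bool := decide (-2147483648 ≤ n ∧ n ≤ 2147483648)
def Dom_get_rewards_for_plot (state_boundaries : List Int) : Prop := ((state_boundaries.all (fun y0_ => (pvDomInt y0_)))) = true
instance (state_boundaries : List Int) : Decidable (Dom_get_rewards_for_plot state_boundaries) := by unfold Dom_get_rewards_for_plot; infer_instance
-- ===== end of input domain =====

-- B replaces A's per-element toggle + conditional append with a length count and
-- closed-form pattern repetition plus slicing (simpler).

-- ===== PORT A =====
-- literal port of A: fold over the boundaries carrying (rewards, is_low_region)
def get_rewards_for_plot (state_boundaries : List Int) : List Int :=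
  (state_boundaries.foldl
    (fun (st : List Int × Bool) _ =>
      if st.2 then (st.1 ++ [1], false) else (st.1 ++ [0], true))
    ([], true)).1

-- ===== PORT B =====
-- literal port of B: count the elements, then ([1,0] * ((n+1)//2))[:n]
def get_rewards_for_plot_alt (state_boundaries : List Int) : List Int :=
  let n : Nat := state_boundaries.foldl (fun c _ => c + 1) 0
  (List.flatten (List.replicate ((n + 1) / 2) [1, 0])).take n

-- ===== PRECONDITION & SPEC =====
def Spec_get_rewards_for_plot (state_boundaries : List Int) (out : List Int) : Prop := out = get_rewards_for_plot_alt state_boundaries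
instance (state_boundaries : List Int) (out : List Int) : Decidable (Spec_get_rewards_for_plot state_boundaries out) := by unfold Spec_get_rewards_for_plot; infer_instance

-- ===== CLAIM (what is proved, stated in full; the proofs are below) =====
def Claim_equal_get_rewards_for_plot : Prop := ∀ (state_boundaries : List Int), Dom_get_rewards_for_plot state_boundaries → Spec_get_rewards_for_plot state_boundaries (get_rewards_for_plot state_boundaries)

-- ===== LEMMAS AND PROOFS =====

-- the alternating pattern of length n starting in region-state b
def pvAlt : Nat → Bool → List Int
  | 0, _ => []
  | n + 1, b => (if b then 1 else 0) :: pvAlt n (!b)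

theorem foldlA_eq_alt (sb : List Int) (acc : List Int) (b : Bool) :
    (sb.foldl
      (fun (st : List Int × Bool) _ =>
        if st.2 then (st.1 ++ [1], false) else (st.1 ++ [0], true))
      (acc, b)).1 = acc ++ pvAlt sb.length b := by
  induction sb generalizing acc b with
  | nil => simp [pvAlt]
  | cons x xs ih =>
    cases b <;> simp [List.foldl, pvAlt, ih]

theorem countFold_eq_length (sb : List Int) (c : Nat) :
    sb.foldl (fun c _ => c + 1) c = c + sb.length := by
  induction sb generalizing c with
  | nil => simp
  | cons x xs ih => simp [List.foldl, ih]; omega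

theorem take_rep_eq_alt (n : Nat) :
    (List.flatten (List.replicate ((n + 1) / 2) ([1, 0] : List Int))).take n = pvAlt n true := by
  induction n using Nat.twoStepInduction with
  | zero => rfl
  | one => rfl
  | more n ih _ =>
    have h : (n + 2 + 1) / 2 = (n + 1) / 2 + 1 := by omega
    rw [h, List.replicate_succ, List.flatten_cons]
    simpa [pvAlt] using ih

-- ===== VERDICT (by name: the statement is the Claim_ definition above) =====
theorem get_rewards_for_plot_spec : Claim_equal_get_rewards_for_plot := by
  intro sb _
  unfold Spec_get_rewards_for_plot get_rewards_for_plot get_rewards_for_plot_alt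
  rw [foldlA_eq_alt, countFold_eq_length]
  simp [take_rep_eq_alt]
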